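-- pv_equiv track=rewrite | github.com/superyyb/leetcode | LCR123-(哈希表)寻找文件副本.py | findRepeatDocument
-- ===== SOURCE A (Python) =====
-- def findRepeatDocument(documents: list[int]) -> int:
--     set_1=set()
--     set_2=set()
--     for doc in documents:
--         if doc not in set_1:
--             set_1.add(doc)
--         else:
--             set_2.add(doc)
--     for doc in set_2:
--         return min(set_2)
-- ===== SOURCE B (Python) =====
-- def findRepeatDocument(documents: list[int]) -> int:
--     s = sorted(documents)
--     for i in range(1, len(s)):
--         if s[i] == s[i - 1]:
--             return s[i]
-- ===== Notes on version B (the rewrite author's own statement) =====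
-- stated objective: alternative
-- what changed: Replaces the two-hash-set seen/duplicates pass plus min() over the duplicate set with sort-then-adjacent-scan: after sorted(), the first adjacent equal pair is the minimum duplicate.
-- outside the precondition, e.g. on findRepeatDocument([1, 2, 3]): A returns None, B returns None
import Mathlib
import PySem

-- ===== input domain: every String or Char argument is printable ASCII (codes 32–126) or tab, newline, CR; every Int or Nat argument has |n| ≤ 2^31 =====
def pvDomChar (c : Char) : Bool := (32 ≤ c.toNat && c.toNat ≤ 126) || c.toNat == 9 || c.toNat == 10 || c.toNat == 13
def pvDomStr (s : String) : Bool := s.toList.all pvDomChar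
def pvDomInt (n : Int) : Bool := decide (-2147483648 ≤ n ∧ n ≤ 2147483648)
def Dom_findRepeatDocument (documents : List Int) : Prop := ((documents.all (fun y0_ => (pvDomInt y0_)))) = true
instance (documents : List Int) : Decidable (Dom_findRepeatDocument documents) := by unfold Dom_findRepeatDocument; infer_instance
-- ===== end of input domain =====

-- B differs from A only in algorithm (sort + adjacent scan vs two hash sets + min); same return value wherever A returns an int.

-- ===== PORT A =====
-- the two-set loop of A: set_1 = seen, set_2 = seen again
def pvLoopA (documents : List Int) : PySem.Set Int × PySem.Set Int :=
  documents.foldl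
    (fun (p : PySem.Set Int × PySem.Set Int) doc =>
      if ¬ PySem.Set.contains p.1 doc then (PySem.Set.add p.1 doc, p.2)
      else (p.1, PySem.Set.add p.2 doc))
    (PySem.Set.empty, PySem.Set.empty)

def findRepeatDocument (documents : List Int) : Int :=
  -- 'for doc in set_2: return min(set_2)': returns min(set_2) iff set_2 is nonempty
  -- (Python returns None when set_2 is empty — excluded by Pre_; 0 here is a junk value outside Pre_)
  match PySem.List.min? (pvLoopA documents).2 (fun x => x) with
  | some m => m
  | none => 0

-- ===== PORT B =====
-- scan for the first adjacent equal pair ('for i in range(1, len(s)): if s[i] == s[i-1]: return s[i]')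
def pvScanAdj : List Int → Int
  | a :: b :: rest => if b = a then b else pvScanAdj (b :: rest)
  | _ => 0   -- Python falls off and returns None — excluded by Pre_

def findRepeatDocument_alt (documents : List Int) : Int :=
  pvScanAdj (PySem.List.sorted documents (fun x => x) false)

-- ===== PRECONDITION & SPEC =====
-- Pre_ excludes duplicate-free lists: there A (and B) fall off the end and return None, which is not an int.
def Pre_findRepeatDocument (documents : List Int) : Prop := ¬ documents.Nodup
instance (documents : List Int) : Decidable (Pre_findRepeatDocument documents) := by unfold Pre_findRepeatDocument; infer_instance

def pvWitness_findRepeatDocument : List Int := [3, 1, 2, 1]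

def Spec_findRepeatDocument (documents : List Int) (out : Int) : Prop := out = findRepeatDocument_alt documents
instance (documents : List Int) (out : Int) : Decidable (Spec_findRepeatDocument documents out) := by unfold Spec_findRepeatDocument; infer_instance

-- ===== CLAIM (what is proved, stated in full; the proofs are below) =====
def Claim_equal_findRepeatDocument : Prop := ∀ (documents : List Int), Dom_findRepeatDocument documents → Pre_findRepeatDocument documents → Spec_findRepeatDocument documents (findRepeatDocument documents)

-- ===== LEMMAS AND PROOFS =====

-- invariant of A's loop: x lands in set_2 iff it was already in set_1/was counted twice
theorem pvLoopA_snd_mem (l : List Int) (s1 s2 : PySem.Set Int) (x : Int) :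
    (x ∈ (l.foldl
      (fun (p : PySem.Set Int × PySem.Set Int) doc =>
        if ¬ PySem.Set.contains p.1 doc then (PySem.Set.add p.1 doc, p.2)
        else (p.1, PySem.Set.add p.2 doc)) (s1, s2)).2)
    ↔ (x ∈ s2 ∨ (x ∈ s1 ∧ x ∈ l) ∨ 2 ≤ l.count x) := by
  induction l generalizing s1 s2 with
  | nil => simp
  | cons a t ih =>
    simp only [List.foldl_cons]
    have hmt : x ∈ t ↔ 0 < t.count x := List.count_pos_iff.symm
    by_cases ha : PySem.Set.contains s1 a
    · have ha' : a ∈ s1 := List.mem_of_elem_eq_true ha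
      rw [if_neg (by simpa using ha'), ih]
      have hmem : x ∈ PySem.Set.add s2 a ↔ x = a ∨ x ∈ s2 := by
        simp [PySem.Set.mem_add]; tauto
      rw [hmem, List.mem_cons, List.count_cons]
      by_cases hx : x = a
      · subst hx
        simp [ha']
      · simp [hx, Ne.symm hx]
    · have ha' : a ∉ s1 := fun h => ha (List.elem_eq_true_of_mem h)
      rw [if_pos (by simpa using ha'), ih]
      have hmem : x ∈ PySem.Set.add s1 a ↔ x = a ∨ x ∈ s1 := by
        simp [PySem.Set.mem_add]; tauto
      rw [hmem, List.mem_cons, List.count_cons]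
      by_cases hx : x = a
      · subst hx
        by_cases hs : x ∈ s2
        · simp [hs]
        · simp [hs, ha']
          rw [hmt]
          omega
      · simp [hx, Ne.symm hx]

theorem pvLoopA_snd_iff (documents : List Int) (x : Int) :
    x ∈ (pvLoopA documents).2 ↔ 2 ≤ documents.count x := by
  unfold pvLoopA
  rw [pvLoopA_snd_mem]
  simp [PySem.Set.empty]

-- B's scan on a sorted list returns exactly the minimal value of count ≥ 2
theorem pvScanAdj_spec (s : List Int) (hs : s.Pairwise (· ≤ ·)) (m : Int)
    (hm : 2 ≤ s.count m) (hmin : ∀ y, 2 ≤ s.count y → m ≤ y) :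
    pvScanAdj s = m := by
  induction s with
  | nil => simp at hm
  | cons a t ih =>
    match t, hs, hm, hmin with
    | [], _, hm, _ =>
      by_cases h : a = m <;> simp [h] at hm
    | b :: rest, hs, hm, hmin =>
      by_cases hba : b = a
      · -- first adjacent equal pair: answer is a
        subst hba
        have hcount : 2 ≤ (b :: b :: rest).count b := by
          simp
        have h1 : m ≤ b := hmin b hcount
        have h2 : b ≤ m := by
          have hmem : m ∈ b :: b :: rest := List.count_pos_iff.mp (by omega)
          rcases List.mem_cons.mp hmem with h | h
          · exact le_of_eq h.symm
          · exact (List.pairwise_cons.mp hs).1 m h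
        have : b = m := le_antisymm h2 h1
        simp [pvScanAdj, this]
      · -- a < b and sorted: a does not occur in the tail
        have hab : a ≤ b := (List.pairwise_cons.mp hs).1 b (by simp)
        have htail : a ∉ b :: rest := by
          intro hmem
          rcases List.mem_cons.mp hmem with h | h
          · exact hba h.symm
          · have hb_le : b ≤ a := (List.pairwise_cons.mp (List.pairwise_cons.mp hs).2).1 a h
            exact hba (le_antisymm hb_le hab)
        have hcnt0 : (b :: rest).count a = 0 := List.count_eq_zero.mpr htail
        have hma : m ≠ a := by
          intro h; subst h
          rw [List.count_cons_self] at hm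
          omega
        have hmt : 2 ≤ (b :: rest).count m := by
          rwa [List.count_cons_of_ne (Ne.symm hma)] at hm
        have hmint : ∀ y, 2 ≤ (b :: rest).count y → m ≤ y := by
          intro y hy
          apply hmin
          by_cases hya : y = a
          · subst hya; omega
          · rwa [List.count_cons_of_ne (Ne.symm hya)]
        have := ih (List.pairwise_cons.mp hs).2 hmt hmint
        simpa [pvScanAdj, hba] using this

-- ===== VERDICT (by name: the statement is the Claim_ definition above) =====
theorem findRepeatDocument_spec : Claim_equal_findRepeatDocument := by
  intro documents _ hpre
  unfold Spec_findRepeatDocument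
  -- a duplicate exists
  obtain ⟨x, hx⟩ : ∃ x, 2 ≤ documents.count x := by
    by_contra h
    refine hpre (List.nodup_iff_count_le_one.mpr (fun a => ?_))
    by_contra h2
    exact h ⟨a, by omega⟩
  -- A's value
  have hxmem : x ∈ (pvLoopA documents).2 := (pvLoopA_snd_iff documents x).mpr hx
  obtain ⟨m, hm⟩ : ∃ m, PySem.List.min? (pvLoopA documents).2 (fun x => x) = some m := by
    cases hmin : PySem.List.min? (pvLoopA documents).2 (fun x => x) with
    | none =>
      rw [PySem.List.min?_eq_none_iff] at hmin
      rw [hmin] at hxmem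
      simp at hxmem
    | some m => exact ⟨m, rfl⟩
  have hmm : m ∈ (pvLoopA documents).2 := PySem.List.min?_mem hm
  have hm2 : 2 ≤ documents.count m := (pvLoopA_snd_iff documents m).mp hmm
  have hmmin : ∀ y, 2 ≤ documents.count y → m ≤ y := by
    intro y hy
    exact PySem.List.min?_isMin hm y ((pvLoopA_snd_iff documents y).mpr hy)
  have hA : findRepeatDocument documents = m := by
    unfold findRepeatDocument
    rw [hm]
  -- B's value: same m, via counts on the sorted permutation
  have hperm : (PySem.List.sorted documents (fun x => x) false).Perm documents :=
    PySem.List.sorted_perm documents (fun x => x) false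
  have hB : findRepeatDocument_alt documents = m := by
    unfold findRepeatDocument_alt
    apply pvScanAdj_spec
    · exact PySem.List.sorted_pairwise documents (fun x => x)
    · rw [hperm.count_eq]; exact hm2
    · intro y hy
      rw [hperm.count_eq] at hy
      exact hmmin y hy
  rw [hA, hB]
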